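-- pv_equiv track=rewrite | github.com/matluca/AdventOfCode | 2015/14/sol.py | get_leaders
-- ===== SOURCE A (Python) =====
-- def get_leaders(reindeers, tot_time):
--     max_distance = 0
--     winning_reindeers = []
--     for i, reindeer in enumerate(reindeers):
--         speed, time, rest = reindeer
--         n_cycle = tot_time // (time + rest)
--         distance = n_cycle * speed * time + min(time, tot_time % (time + rest)) * speed
--         if distance == max_distance:
--             winning_reindeers.append(i)
--         if distance > max_distance:
--             max_distance = distance
--             winning_reindeers = [i]
--     return max_distance, winning_reindeers
-- ===== SOURCE B (Python) =====
-- def get_leaders(reindeers, tot_time):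
--     distances = []
--     for speed, time, rest in reindeers:
--         cycle = time + rest
--         distances.append((tot_time // cycle) * speed * time
--                          + min(time, tot_time % cycle) * speed)
--     best = max(max(distances, default=0), 0)
--     return best, [i for i, d in enumerate(distances) if d == best]
-- ===== Notes on version B (the rewrite author's own statement) =====
-- stated objective: simpler
-- what changed: Replaces the stateful single pass (running max with append/reset of the winner list) by a two-phase decomposition: compute all distances once, take their maximum clamped at 0 (A seeds its max at 0), then select the winning indices with one comprehension.
import Mathlib
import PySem

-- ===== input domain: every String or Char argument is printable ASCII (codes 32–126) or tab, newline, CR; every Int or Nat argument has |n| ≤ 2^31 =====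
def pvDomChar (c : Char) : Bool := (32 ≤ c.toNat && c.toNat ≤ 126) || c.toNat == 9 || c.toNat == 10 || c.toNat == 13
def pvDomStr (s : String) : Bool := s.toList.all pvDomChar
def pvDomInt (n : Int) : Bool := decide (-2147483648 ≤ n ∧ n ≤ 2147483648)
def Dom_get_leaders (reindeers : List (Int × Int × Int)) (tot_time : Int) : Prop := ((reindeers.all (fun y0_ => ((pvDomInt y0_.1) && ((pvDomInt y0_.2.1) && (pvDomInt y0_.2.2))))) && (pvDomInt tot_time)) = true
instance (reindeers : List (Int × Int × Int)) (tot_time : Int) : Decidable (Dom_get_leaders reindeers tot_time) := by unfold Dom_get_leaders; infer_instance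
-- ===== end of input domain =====

-- B replaces A's stateful single pass (running max with append/reset) by a two-phase
-- decomposition: distances list, clamped maximum, then one selection pass (objective: simpler).


-- ===== PORT A =====
def get_leaders (reindeers : List (Int × Int × Int)) (tot_time : Int) : Int × List Int :=
  (PySem.List.enumerate reindeers).foldl
    (fun st p =>
      let i := p.1
      let speed := p.2.1
      let time := p.2.2.1
      let rest := p.2.2.2
      let n_cycle := PySem.Int.floordiv tot_time (time + rest)
      let distance := n_cycle * speed * time + min time (PySem.Int.mod tot_time (time + rest)) * speed
      let st1 := if distance = st.1 then (st.1, st.2 ++ [i]) else st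
      if distance > st1.1 then (distance, [i]) else st1)
    (0, [])

-- ===== PORT B =====
def get_leaders_alt (reindeers : List (Int × Int × Int)) (tot_time : Int) : Int × List Int :=
  let distances := reindeers.map (fun r =>
    let cycle := r.2.1 + r.2.2
    PySem.Int.floordiv tot_time cycle * r.1 * r.2.1 + min r.2.1 (PySem.Int.mod tot_time cycle) * r.1)
  let best := max (PySem.List.maxD distances (fun d => d) 0) 0
  (best, (PySem.List.enumerate distances).filterMap (fun p => if p.2 = best then some p.1 else none))

-- ===== PRECONDITION & SPEC =====
-- Pre_ excludes exactly the inputs where some reindeer has time + rest = 0: there both A and B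
-- raise ZeroDivisionError.
def Pre_get_leaders (reindeers : List (Int × Int × Int)) (tot_time : Int) : Prop :=
  ∀ r ∈ reindeers, r.2.1 + r.2.2 ≠ 0
instance (reindeers : List (Int × Int × Int)) (tot_time : Int) : Decidable (Pre_get_leaders reindeers tot_time) := by unfold Pre_get_leaders; infer_instance
def pvWitness_get_leaders : (List (Int × Int × Int)) × Int := ([(14, 10, 127), (16, 11, 162)], 1000)

def Spec_get_leaders (reindeers : List (Int × Int × Int)) (tot_time : Int) (out : Int × List Int) : Prop := out = get_leaders_alt reindeers tot_time
instance (reindeers : List (Int × Int × Int)) (tot_time : Int) (out : Int × List Int) : Decidable (Spec_get_leaders reindeers tot_time out) := by unfold Spec_get_leaders; infer_instance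

-- ===== CLAIM (what is proved, stated in full; the proofs are below) =====
def Claim_equal_get_leaders : Prop := ∀ (reindeers : List (Int × Int × Int)) (tot_time : Int), Dom_get_leaders reindeers tot_time → Pre_get_leaders reindeers tot_time → Spec_get_leaders reindeers tot_time (get_leaders reindeers tot_time)

-- ===== LEMMAS AND PROOFS =====

-- the per-reindeer distance (the arithmetic both ports compute)
def pvD (tot_time : Int) (r : Int × Int × Int) : Int :=
  PySem.Int.floordiv tot_time (r.2.1 + r.2.2) * r.1 * r.2.1 +
    min r.2.1 (PySem.Int.mod tot_time (r.2.1 + r.2.2)) * r.1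

-- A's loop body, named (definitionally what the port folds with)
def pvStep (tot_time : Int) (st : Int × List Int) (p : Int × (Int × Int × Int)) : Int × List Int :=
  let d := pvD tot_time p.2
  let st1 := if d = st.1 then (st.1, st.2 ++ [p.1]) else st
  if d > st1.1 then (d, [p.1]) else st1

theorem pv_getA (reindeers : List (Int × Int × Int)) (tot_time : Int) :
    get_leaders reindeers tot_time =
      (PySem.List.enumerate reindeers).foldl (pvStep tot_time) (0, []) := rfl

theorem pvStep_eq (tot_time m : Int) (w : List Int) (k : Int) (r : Int × Int × Int)
    (h : pvD tot_time r = m) : pvStep tot_time (m, w) (k, r) = (m, w ++ [k]) := by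
  simp [pvStep, h]

theorem pvStep_gt (tot_time m : Int) (w : List Int) (k : Int) (r : Int × Int × Int)
    (h : m < pvD tot_time r) : pvStep tot_time (m, w) (k, r) = (pvD tot_time r, [k]) := by
  have hne : pvD tot_time r ≠ m := ne_of_gt h
  simp [pvStep, hne, h]

theorem pvStep_lt (tot_time m : Int) (w : List Int) (k : Int) (r : Int × Int × Int)
    (h : pvD tot_time r < m) : pvStep tot_time (m, w) (k, r) = (m, w) := by
  have hne : pvD tot_time r ≠ m := ne_of_lt h
  simp [pvStep, hne, not_lt_of_gt h]

theorem pv_foldl_max_max (a b : Int) (l : List Int) :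
    l.foldl max (max a b) = max a (l.foldl max b) := by
  induction l generalizing b with
  | nil => rfl
  | cons c t ih => simp only [List.foldl_cons, max_assoc, ih]

-- characterisation of A's fold from an arbitrary start state
theorem pv_foldA (tot_time : Int) (rs : List (Int × Int × Int)) (k : Int) (m : Int) (w : List Int) :
    (PySem.List.enumerate rs k).foldl (pvStep tot_time) (m, w)
    = ((rs.map (pvD tot_time)).foldl max m,
       (if (rs.map (pvD tot_time)).foldl max m = m then w else []) ++
         (PySem.List.enumerate rs k).filterMap
           (fun p => if pvD tot_time p.2 = (rs.map (pvD tot_time)).foldl max m then some p.1 else none)) := by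
  induction rs generalizing k m w with
  | nil => simp [PySem.List.enumerate]
  | cons r t ih =>
      rw [PySem.List.enumerate_cons]
      simp only [List.map_cons, List.foldl_cons, List.filterMap_cons]
      rcases lt_trichotomy (pvD tot_time r) m with hlt | heq | hgt
      · -- d0 < m : state unchanged
        rw [pvStep_lt tot_time m w k r hlt, ih]
        simp only [max_eq_left (le_of_lt hlt)]
        have hMm : m ≤ (t.map (pvD tot_time)).foldl max m := (PySem.List.le_foldl_max _ _).1
        have hne : ¬ pvD tot_time r = (t.map (pvD tot_time)).foldl max m :=
          ne_of_lt (lt_of_lt_of_le hlt hMm)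
        simp [hne]
      · -- d0 = m : k appended
        rw [pvStep_eq tot_time m w k r heq, ih]
        simp only [heq, max_self]
        by_cases hF : (t.map (pvD tot_time)).foldl max m = m
        · simp [hF]
        · have : ¬ m = (t.map (pvD tot_time)).foldl max m := fun h => hF h.symm
          simp [hF, this]
      · -- m < d0 : reset
        rw [pvStep_gt tot_time m w k r hgt, ih]
        simp only [max_eq_right (le_of_lt hgt)]
        have hMd0 : pvD tot_time r ≤ (t.map (pvD tot_time)).foldl max (pvD tot_time r) :=
          (PySem.List.le_foldl_max _ _).1
        have hMm : ¬ (t.map (pvD tot_time)).foldl max (pvD tot_time r) = m :=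
          ne_of_gt (lt_of_lt_of_le hgt hMd0)
        by_cases hMd : (t.map (pvD tot_time)).foldl max (pvD tot_time r) = pvD tot_time r
        · simp [hMd, eq_comm, ne_of_lt hgt]
        · have : ¬ pvD tot_time r = (t.map (pvD tot_time)).foldl max (pvD tot_time r) :=
            fun h => hMd h.symm
          simp [hMm, hMd, this]

theorem pv_enumerate_map {α β : Type} (f : α → β) (xs : List α) (k : Int) :
    PySem.List.enumerate (xs.map f) k =
      (PySem.List.enumerate xs k).map (fun p => (p.1, f p.2)) := by
  induction xs generalizing k with
  | nil => simp [PySem.List.enumerate]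
  | cons x t ih => simp [PySem.List.enumerate_cons, ih]

theorem pv_best_eq (l : List Int) :
    max (PySem.List.maxD l (fun d => d) 0) 0 = l.foldl max 0 := by
  cases l with
  | nil =>
      have h : PySem.List.max? ([] : List Int) (fun d => d) = none :=
        (PySem.List.max?_eq_none_iff _ _).mpr rfl
      simp [PySem.List.maxD, h]
  | cons d t =>
      have h : PySem.List.maxD (d :: t) (fun y => y) 0 = t.foldl max d := by
        simp [PySem.List.maxD, PySem.List.max?_id_cons]
      rw [h, max_comm, show (List.foldl max 0 (d :: t)) = t.foldl max (max 0 d) from rfl,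
        pv_foldl_max_max]

-- ===== VERDICT (by name: the statement is the Claim_ definition above) =====
theorem get_leaders_spec : Claim_equal_get_leaders := by
  intro rs tt _ _
  unfold Spec_get_leaders
  simp only [get_leaders_alt]
  rw [pv_getA, pv_foldA]
  have hf : (fun r : Int × Int × Int =>
      let cycle := r.2.1 + r.2.2
      PySem.Int.floordiv tt cycle * r.1 * r.2.1 + min r.2.1 (PySem.Int.mod tt cycle) * r.1)
      = pvD tt := rfl
  rw [hf, pv_best_eq, pv_enumerate_map, List.filterMap_map]
  by_cases h0 : (rs.map (pvD tt)).foldl max 0 = 0 <;> simp [h0]
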